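-- pv_equiv track=rewrite | github.com/0xdeadbeefnetwork/sigil-web | sigil/crypto/encoding.py | convertbits
-- ===== SOURCE A (Python) =====
-- from typing import Tuple, List
--
-- def convertbits(data: List[int], frombits: int, tobits: int, pad: bool = True) -> List[int]:
--     """Convert between bit widths"""
--     acc = 0
--     bits = 0
--     ret = []
--     maxv = (1 << tobits) - 1
--     for value in data:
--         acc = (acc << frombits) | value
--         bits += frombits
--         while bits >= tobits:
--             bits -= tobits
--             ret.append((acc >> bits) & maxv)
--     if pad:
--         if bits:
--             ret.append((acc << (tobits - bits)) & maxv)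
--     return ret
-- ===== SOURCE B (Python) =====
-- def convertbits(data, frombits, tobits, pad=True):
--     """Convert between bit widths"""
--     # fold the whole input into one big integer, keeping every prefix accumulator
--     prefixes = [0]
--     acc = 0
--     for value in data:
--         acc = (acc << frombits) | value
--         prefixes.append(acc)
--     total = len(data) * frombits
--     maxv = (1 << tobits) - 1
--     ret = []
--     for k in range(total // tobits):
--         # first prefix that already contains the k-th output group
--         i = -(-(k + 1) * tobits // frombits)
--         ret.append((prefixes[i] >> (i * frombits - (k + 1) * tobits)) & maxv)
--     rem = total % tobits
--     if pad and rem: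
--         ret.append((acc << (tobits - rem)) & maxv)
--     return ret
-- ===== Notes on version B (the rewrite author's own statement) =====
-- stated objective: alternative
-- what changed: A interleaves accumulation with an inner while-loop that emits groups as bits become available; B first records all prefix accumulators in one pass, then emits each output group directly by closed-form index/shift arithmetic (group k comes from prefix ceil((k+1)*tobits/frombits)), with the padded tail computed from total%tobits.
-- outside the precondition, e.g. on convertbits([], 5, 0, True): A returns [], B raises ZeroDivisionError; on convertbits([], -3, 8, True): A returns [], B returns []
import Mathlib
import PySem

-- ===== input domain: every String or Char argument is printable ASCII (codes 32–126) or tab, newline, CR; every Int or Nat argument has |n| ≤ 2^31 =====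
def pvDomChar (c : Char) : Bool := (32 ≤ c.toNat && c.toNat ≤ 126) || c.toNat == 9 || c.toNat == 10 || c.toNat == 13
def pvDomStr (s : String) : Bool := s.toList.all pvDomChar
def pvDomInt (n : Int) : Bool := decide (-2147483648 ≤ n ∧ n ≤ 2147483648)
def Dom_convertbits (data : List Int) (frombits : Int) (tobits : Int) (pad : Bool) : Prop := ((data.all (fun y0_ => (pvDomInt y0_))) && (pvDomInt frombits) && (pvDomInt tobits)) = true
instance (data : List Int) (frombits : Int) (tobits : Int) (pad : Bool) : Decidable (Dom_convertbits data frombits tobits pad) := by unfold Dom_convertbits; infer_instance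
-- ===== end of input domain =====

-- B regroups the bit stream by closed-form index/shift arithmetic over recorded prefix
-- accumulators instead of A's interleaved inner while-loop (objective: alternative).

-- ===== PORT A =====
-- A's inner `while bits >= tobits:` loop.  On admitted inputs (1 ≤ tobits) each iteration
-- lowers `bits` by at least one, so fuel `bits.toNat + 1` is enough for an exact transcription.
def pvInner (tobits maxv acc : Int) : Nat → Int → List Int → Int × List Int
  | 0, bits, ret => (bits, ret)
  | fuel + 1, bits, ret =>
    if tobits ≤ bits then
      pvInner tobits maxv acc fuel (bits - tobits)
        (ret ++ [PySem.Int.band (acc >>> (bits - tobits).toNat) maxv])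
    else (bits, ret)

-- body of A's `for value in data:` loop, acting on the state (acc, bits, ret)
def pvStepA (frombits tobits maxv : Int) (st : Int × Int × List Int) (value : Int) :
    Int × Int × List Int :=
  let acc := PySem.Int.bor (st.1 <<< frombits.toNat) value
  let bits := st.2.1 + frombits
  let br := pvInner tobits maxv acc (bits.toNat + 1) bits st.2.2
  (acc, br.1, br.2)

def convertbits (data : List Int) (frombits : Int) (tobits : Int) (pad : Bool) : List Int :=
  let maxv : Int := (1 <<< tobits.toNat) - 1
  let st := data.foldl (pvStepA frombits tobits maxv) (0, 0, [])
  if pad then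
    (if st.2.1 ≠ 0 then st.2.2 ++ [PySem.Int.band (st.1 <<< (tobits - st.2.1).toNat) maxv]
     else st.2.2)
  else st.2.2

-- ===== PORT B =====
-- body of B's first loop: record every prefix accumulator
def pvStepB (frombits : Int) (pa : List Int × Int) (value : Int) : List Int × Int :=
  let acc := PySem.Int.bor (pa.2 <<< frombits.toNat) value
  (pa.1 ++ [acc], acc)

def convertbits_alt (data : List Int) (frombits : Int) (tobits : Int) (pad : Bool) : List Int :=
  let pa := data.foldl (pvStepB frombits) ([0], 0)
  let total : Int := PySem.List.len data * frombits
  let maxv : Int := (1 <<< tobits.toNat) - 1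
  let ret := (PySem.List.pyRange 0 (PySem.Int.floordiv total tobits) 1).map (fun k =>
    let i := -(PySem.Int.floordiv (-(k + 1) * tobits) frombits)
    PySem.Int.band (PySem.List.pyGetD pa.1 i 0 >>> (i * frombits - (k + 1) * tobits).toNat) maxv)
  let rem := PySem.Int.mod total tobits
  if pad && decide (rem ≠ 0) then ret ++ [PySem.Int.band (pa.2 <<< (tobits - rem).toNat) maxv]
  else ret

-- ===== PRECONDITION & SPEC =====
-- Outside Pre_ the Python A raises ValueError (a shift or `1 << tobits` with a negative count)
-- or never returns (tobits ≤ 0 makes the inner while-loop spin); the only returning inputs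
-- excluded are the degenerate empty-data corners listed in the claim's cites.
def Pre_convertbits (data : List Int) (frombits : Int) (tobits : Int) (pad : Bool) : Prop :=
  0 ≤ frombits ∧ 1 ≤ tobits
instance (data : List Int) (frombits : Int) (tobits : Int) (pad : Bool) :
    Decidable (Pre_convertbits data frombits tobits pad) := by unfold Pre_convertbits; infer_instance

def pvWitness_convertbits : List Int × Int × Int × Bool := ([3, 1], 2, 3, true)

def Spec_convertbits (data : List Int) (frombits : Int) (tobits : Int) (pad : Bool) (out : List Int) : Prop := out = convertbits_alt data frombits tobits pad
instance (data : List Int) (frombits : Int) (tobits : Int) (pad : Bool) (out : List Int) : Decidable (Spec_convertbits data frombits tobits pad out) := by unfold Spec_convertbits; infer_instance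

-- ===== CLAIM (what is proved, stated in full; the proofs are below) =====
def Claim_equal_convertbits : Prop := ∀ (data : List Int) (frombits : Int) (tobits : Int) (pad : Bool), Dom_convertbits data frombits tobits pad → Pre_convertbits data frombits tobits pad → Spec_convertbits data frombits tobits pad (convertbits data frombits tobits pad)

-- ===== LEMMAS AND PROOFS =====

-- shared accumulator step `acc = (acc << frombits) | value` and prefix accumulator
def pvAccF (f a v : Int) : Int := PySem.Int.bor (a <<< f.toNat) v
def pvPref (f : Int) (l : List Int) : Int := l.foldl (pvAccF f) 0

-- the k-th output group, read off the right prefix accumulator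
def pvIdx (f t : Int) (k : Nat) : Int := -(PySem.Int.floordiv (-(((k : Int) + 1) * t)) f)
def pvChunk (f t maxv : Int) (data : List Int) (k : Nat) : Int :=
  PySem.Int.band
    (pvPref f (data.take (pvIdx f t k).toNat) >>> (pvIdx f t k * f - ((k : Int) + 1) * t).toNat)
    maxv

lemma pvInner_spec (t maxv acc : Int) (ht : 1 ≤ t) :
    ∀ (fuel : Nat) (bits : Int) (ret : List Int), 0 ≤ bits → bits < (fuel : Int) →
    pvInner t maxv acc fuel bits ret =
      (PySem.Int.mod bits t,
       ret ++ (List.range (PySem.Int.floordiv bits t).toNat).map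
         (fun (j : Nat) => PySem.Int.band (acc >>> (bits - ((j : Int) + 1) * t).toNat) maxv)) := by
  intro fuel
  induction fuel with
  | zero => intro bits ret h0 hlt; exfalso; push_cast at hlt; omega
  | succ fuel ih =>
    intro bits ret h0 hlt
    by_cases hge : t ≤ bits
    · simp only [pvInner, if_pos hge]
      rw [ih (bits - t) _ (by omega) (by push_cast at hlt ⊢; omega)]
      have h1 : PySem.Int.mod (bits - t) t = PySem.Int.mod bits t := by
        rw [PySem.Int.mod_eq_emod_of_pos (by omega), PySem.Int.mod_eq_emod_of_pos (by omega),
          Int.sub_emod_right]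
      have hd0 : 0 ≤ PySem.Int.floordiv (bits - t) t := by
        rw [PySem.Int.floordiv_eq_ediv_of_pos (by omega)]
        exact Int.ediv_nonneg (by omega) (by omega)
      have h2 : PySem.Int.floordiv bits t = PySem.Int.floordiv (bits - t) t + 1 := by
        rw [PySem.Int.floordiv_eq_ediv_of_pos (by omega),
          PySem.Int.floordiv_eq_ediv_of_pos (by omega)]
        have hb : bits = (bits - t) + 1 * t := by ring
        rw [hb, Int.add_mul_ediv_right _ _ (show t ≠ 0 by omega)]
        ring_nf
      have h3 : (PySem.Int.floordiv bits t).toNat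
          = (PySem.Int.floordiv (bits - t) t).toNat + 1 := by omega
      refine Prod.ext h1 ?_
      simp only [h3, List.range_succ_eq_map, List.map_cons, List.map_map, List.append_assoc,
        List.singleton_append]
      congr 1
      congr 1
      · have hx : bits - (((0 : Nat) : Int) + 1) * t = bits - t := by push_cast; ring
        rw [hx]
      · apply List.map_congr_left
        intro j _
        simp only [Function.comp]
        have hx : bits - t - ((j : Int) + 1) * t
            = bits - (((Nat.succ j : Nat) : Int) + 1) * t := by push_cast; ring
        rw [hx]
    · simp only [pvInner, if_neg hge]
      have hm : PySem.Int.mod bits t = bits := by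
        rw [PySem.Int.mod_eq_emod_of_pos (by omega)]
        exact Int.emod_eq_of_lt h0 (by omega)
      have hdv : PySem.Int.floordiv bits t = 0 := by
        rw [PySem.Int.floordiv_eq_ediv_of_pos (by omega)]
        exact Int.ediv_eq_zero_of_lt h0 (by omega)
      simp [hm, hdv]

lemma pvChunk_append (f t maxv : Int) (hf : 0 < f) (data : List Int) (v : Int) (k : Nat)
    (hk : ((k : Int) + 1) * t ≤ (data.length : Int) * f) :
    pvChunk f t maxv (data ++ [v]) k = pvChunk f t maxv data k := by
  unfold pvChunk
  set i : Int := pvIdx f t k with hi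
  have hii : (i - 1) * f < ((k : Int) + 1) * t ∧ ((k : Int) + 1) * t ≤ i * f :=
    (PySem.Int.neg_floordiv_neg_eq_iff_of_pos hf).mp (by rw [hi, pvIdx])
  have h1 : (i - 1) * f < (data.length : Int) * f := lt_of_lt_of_le hii.1 hk
  have h2 : i - 1 < (data.length : Int) := lt_of_mul_lt_mul_right h1 (le_of_lt hf)
  have h3 : i.toNat ≤ data.length := by omega
  rw [List.take_append_of_le_length h3]

lemma foldA_spec (f t maxv : Int) (hf : 0 ≤ f) (ht : 1 ≤ t) (data : List Int) :
    data.foldl (pvStepA f t maxv) (0, 0, ([] : List Int)) =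
      (pvPref f data,
       PySem.Int.mod ((data.length : Int) * f) t,
       (List.range (PySem.Int.floordiv ((data.length : Int) * f) t).toNat).map
         (pvChunk f t maxv data)) := by
  induction data using List.reverseRecOn with
  | nil =>
    have hm : PySem.Int.mod 0 t = 0 := by
      rw [PySem.Int.mod_eq_emod_of_pos (by omega)]; simp
    have hd : PySem.Int.floordiv 0 t = 0 := by
      rw [PySem.Int.floordiv_eq_ediv_of_pos (by omega)]; simp
    simp [pvPref, hm, hd]
  | append_singleton data v ih =>
    rw [List.foldl_append, ih, List.foldl_cons, List.foldl_nil]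
    have htp : (0 : Int) < t := by omega
    set n := data.length with hndef
    set N : Int := (n : Int) * f with hNdef
    set M : Int := PySem.Int.floordiv N t with hMdef
    set b : Int := PySem.Int.mod N t with hbdef
    have hb0 : 0 ≤ b := PySem.Int.mod_nonneg N htp
    have hbt : b < t := PySem.Int.mod_lt N htp
    have hNb : M * t + b = N := PySem.Int.floordiv_mul_add_mod N t
    have hN0 : 0 ≤ N := by rw [hNdef]; positivity
    have hM0 : 0 ≤ M := by
      rw [hMdef, PySem.Int.floordiv_eq_ediv_of_pos htp]
      exact Int.ediv_nonneg hN0 (by omega)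
    have hstepA : ∀ (x y : Int) (z : List Int), pvStepA f t maxv (x, y, z) v =
        (PySem.Int.bor (x <<< f.toNat) v,
         (pvInner t maxv (PySem.Int.bor (x <<< f.toNat) v) ((y + f).toNat + 1) (y + f) z).1,
         (pvInner t maxv (PySem.Int.bor (x <<< f.toNat) v) ((y + f).toNat + 1) (y + f) z).2) :=
      fun _ _ _ => rfl
    rw [hstepA]
    have hacc : PySem.Int.bor ((pvPref f data) <<< f.toNat) v = pvPref f (data ++ [v]) := by
      simp [pvPref, pvAccF, List.foldl_append]
    rw [hacc]
    rw [pvInner_spec t maxv (pvPref f (data ++ [v])) ht ((b + f).toNat + 1) (b + f)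
      ((List.range M.toNat).map (pvChunk f t maxv data)) (by omega) (by omega)]
    have hlen : (((data ++ [v]).length : Nat) : Int) * f = N + f := by
      simp only [List.length_append, List.length_cons, List.length_nil]
      push_cast
      rw [hNdef]; ring
    have hd0 : 0 ≤ PySem.Int.floordiv (b + f) t := by
      rw [PySem.Int.floordiv_eq_ediv_of_pos htp]
      exact Int.ediv_nonneg (by omega) (by omega)
    set d : Int := PySem.Int.floordiv (b + f) t with hddef
    refine Prod.ext rfl (Prod.ext ?_ ?_)
    · -- the `bits` component
      show PySem.Int.mod (b + f) t = PySem.Int.mod ((((data ++ [v]).length : Nat) : Int) * f) t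
      rw [hlen, PySem.Int.mod_eq_emod_of_pos htp, PySem.Int.mod_eq_emod_of_pos htp, ← hNb]
      have e : M * t + b + f = (b + f) + M * t := by ring
      rw [e, Int.add_mul_emod_self_right]
    · -- the `ret` component
      show (List.range M.toNat).map (pvChunk f t maxv data) ++
          (List.range d.toNat).map
            (fun (j : Nat) => PySem.Int.band
              (pvPref f (data ++ [v]) >>> ((b + f) - ((j : Int) + 1) * t).toNat) maxv)
        = (List.range (PySem.Int.floordiv ((((data ++ [v]).length : Nat) : Int) * f) t).toNat).map
            (pvChunk f t maxv (data ++ [v]))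
      have hMd : PySem.Int.floordiv ((((data ++ [v]).length : Nat) : Int) * f) t = M + d := by
        have e : N + f = (b + f) + M * t := by rw [← hNb]; ring
        rw [hlen, e, PySem.Int.floordiv_eq_ediv_of_pos htp,
          Int.add_mul_ediv_right _ _ (show t ≠ 0 by omega),
          ← PySem.Int.floordiv_eq_ediv_of_pos htp, ← hddef]
        omega
      rw [hMd]
      have htn : (M + d).toNat = M.toNat + d.toNat := by omega
      rw [htn, List.range_add, List.map_append, List.map_map]
      congr 1
      · apply List.map_congr_left
        intro k hk
        rw [List.mem_range] at hk
        have hM1 : (1 : Int) ≤ M := by omega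
        have hfpos : (0 : Int) < f := by
          rcases lt_or_eq_of_le hf with h | h
          · exact h
          · exfalso
            have hN1 : N = 0 := by rw [hNdef, ← h]; ring
            nlinarith [hNb, hb0, hM1, ht]
        refine (pvChunk_append f t maxv hfpos data v k ?_).symm
        have hkM : ((k : Int) + 1) ≤ M := by omega
        have : ((k : Int) + 1) * t ≤ M * t := by
          exact mul_le_mul_of_nonneg_right hkM (by omega)
        rw [← hNdef]
        linarith [hNb, hb0]
      · apply List.map_congr_left
        intro j hj
        rw [List.mem_range] at hj
        simp only [Function.comp]
        have hd1 : (1 : Int) ≤ d := by omega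
        have htb : t ≤ b + f := by
          have h1 : (1 : Int) ≤ PySem.Int.floordiv (b + f) t := by rw [← hddef]; omega
          have := (PySem.Int.le_floordiv_iff_mul_le htp).mp h1
          linarith
        have hfpos : (0 : Int) < f := by omega
        have hjt : ((j : Int) + 1) * t ≤ b + f := by
          have hjd : ((j : Int) + 1) ≤ PySem.Int.floordiv (b + f) t := by rw [← hddef]; omega
          exact (PySem.Int.le_floordiv_iff_mul_le htp).mp hjd
        symm
        show pvChunk f t maxv (data ++ [v]) (M.toNat + j)
          = PySem.Int.band
              (pvPref f (data ++ [v]) >>> ((b + f) - ((j : Int) + 1) * t).toNat) maxv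
        simp only [pvChunk, pvIdx]
        have hcast : (((M.toNat + j : Nat)) : Int) = M + (j : Int) := by push_cast; omega
        rw [hcast]
        have hieq : -(PySem.Int.floordiv (-((M + (j : Int) + 1) * t)) f) = (n : Int) + 1 := by
          refine (PySem.Int.neg_floordiv_neg_eq_iff_of_pos hfpos).mpr ⟨?_, ?_⟩
          · have e1 : ((n : Int) + 1 - 1) * f = N := by rw [hNdef]; ring
            have e2 : (M + (j : Int) + 1) * t = M * t + ((j : Int) * t + t) := by ring
            have hjt0 : 0 ≤ (j : Int) * t := by positivity
            rw [e1, e2]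
            linarith [hNb, hbt]
          · have e2 : (M + (j : Int) + 1) * t = M * t + ((j : Int) + 1) * t := by ring
            have e3 : ((n : Int) + 1) * f = N + f := by rw [hNdef]; ring
            rw [e2, e3]
            linarith [hjt, hNb]
        rw [hieq]
        have htake : (data ++ [v]).take (((n : Int) + 1).toNat) = data ++ [v] := by
          apply List.take_of_length_le
          simp [hndef]
        rw [htake]
        have hsh : ((n : Int) + 1) * f - (M + (j : Int) + 1) * t = (b + f) - ((j : Int) + 1) * t := by
          have e3 : ((n : Int) + 1) * f = N + f := by rw [hNdef]; ring
          rw [e3, ← hNb]; ring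
        rw [hsh]

lemma foldB_spec (f : Int) (data : List Int) : ∀ (P : List Int) (a : Int),
    data.foldl (pvStepB f) (P, a) =
      (P ++ (List.range data.length).map (fun i => (data.take (i + 1)).foldl (pvAccF f) a),
       data.foldl (pvAccF f) a) := by
  induction data with
  | nil => intro P a; simp
  | cons v rest ih =>
    intro P a
    simp only [List.foldl_cons]
    have hstep : pvStepB f (P, a) v = (P ++ [pvAccF f a v], pvAccF f a v) := rfl
    rw [hstep, ih]
    refine Prod.ext ?_ rfl
    simp only [List.length_cons, List.range_succ_eq_map, List.map_cons, List.map_map,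
      List.append_assoc, List.singleton_append]
    congr 1

lemma pyGetD_prefixes (f : Int) (data : List Int) (i : Int)
    (h1 : 1 ≤ i) (h2 : i ≤ (data.length : Int)) :
    PySem.List.pyGetD ([0] ++ (List.range data.length).map
        (fun i' => (data.take (i' + 1)).foldl (pvAccF f) 0)) i 0
      = pvPref f (data.take i.toNat) := by
  have hlt : i < ((([0] ++ (List.range data.length).map
      (fun i' => (data.take (i' + 1)).foldl (pvAccF f) 0)).length : Nat) : Int) := by
    simp
    omega
  rw [PySem.List.pyGetD_eq_getElem _ 0 (by omega) hlt]
  rw [List.getElem_append_right (by simp; omega)]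
  simp only [List.length_singleton]
  rw [List.getElem_map, List.getElem_range]
  have h3 : i.toNat - 1 + 1 = i.toNat := by omega
  rw [h3, pvPref]

-- the element-wise equality of B's group map with pvChunk
lemma convB_elt (f t maxv : Int) (hf : 0 ≤ f) (ht : 1 ≤ t) (data : List Int) (k : Nat)
    (hk : (k : Int) < PySem.Int.floordiv ((data.length : Int) * f) t) :
    PySem.Int.band
      (PySem.List.pyGetD ([0] ++ (List.range data.length).map
          (fun i' => (data.take (i' + 1)).foldl (pvAccF f) 0))
        (pvIdx f t k) 0 >>> (pvIdx f t k * f - ((k : Int) + 1) * t).toNat) maxv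
      = pvChunk f t maxv data k := by
  have htp : (0 : Int) < t := by omega
  set N : Int := (data.length : Int) * f with hNdef
  have hN0 : 0 ≤ N := by rw [hNdef]; positivity
  have hkt : ((k : Int) + 1) * t ≤ N := by
    have : (k : Int) + 1 ≤ PySem.Int.floordiv N t := by omega
    exact (PySem.Int.le_floordiv_iff_mul_le htp).mp this
  have hfpos : (0 : Int) < f := by
    rcases lt_or_eq_of_le hf with h | h
    · exact h
    · exfalso
      have hN1 : N = 0 := by rw [hNdef, ← h]; ring
      have : ((k : Int) + 1) * t ≥ 1 * t := by
        apply mul_le_mul_of_nonneg_right (by omega) (by omega)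
      omega
  have hii : (pvIdx f t k - 1) * f < ((k : Int) + 1) * t
      ∧ ((k : Int) + 1) * t ≤ pvIdx f t k * f :=
    (PySem.Int.neg_floordiv_neg_eq_iff_of_pos hfpos).mp (by rw [pvIdx])
  set i : Int := pvIdx f t k with hidef
  have hi1 : 1 ≤ i := by
    by_contra h
    have : i * f ≤ 0 := by
      apply mul_nonpos_of_nonpos_of_nonneg (by omega) (by omega)
    have : (1 : Int) * t ≤ ((k : Int) + 1) * t := by
      apply mul_le_mul_of_nonneg_right (by omega) (by omega)
    omega
  have hin : i ≤ (data.length : Int) := by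
    have h1 : (i - 1) * f < N := lt_of_lt_of_le hii.1 hkt
    have h2 : i - 1 < (data.length : Int) := by
      rw [hNdef] at h1
      exact lt_of_mul_lt_mul_right h1 (le_of_lt hfpos)
    omega
  rw [pyGetD_prefixes f data i hi1 hin]
  rw [pvChunk, ← hidef]

-- ===== VERDICT (by name: the statement is the Claim_ definition above) =====
theorem convertbits_spec : Claim_equal_convertbits := by
  intro data f t pad hdom hpre
  obtain ⟨hf, ht⟩ := hpre
  unfold Spec_convertbits
  simp only [convertbits, convertbits_alt]
  rw [foldA_spec f t ((1 <<< t.toNat) - 1) hf ht data, foldB_spec f data [0] 0]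
  simp only [PySem.List.len_eq]
  have hBmap : (PySem.List.pyRange 0 (PySem.Int.floordiv ((data.length : Int) * f) t) 1).map
      (fun k =>
        PySem.Int.band
          (PySem.List.pyGetD ([0] ++ (List.range data.length).map
              (fun i' => (data.take (i' + 1)).foldl (pvAccF f) 0))
            (-(PySem.Int.floordiv (-(k + 1) * t) f)) 0 >>>
              (-(PySem.Int.floordiv (-(k + 1) * t) f) * f - (k + 1) * t).toNat)
          ((1 <<< t.toNat) - 1))
      = (List.range (PySem.Int.floordiv ((data.length : Int) * f) t).toNat).map
          (pvChunk f t ((1 <<< t.toNat) - 1) data) := by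
    rw [PySem.List.pyRange_one, List.map_map]
    rw [sub_zero]
    apply List.map_congr_left
    intro k hk
    rw [List.mem_range] at hk
    have htp : (0 : Int) < t := by omega
    have hM0 : 0 ≤ PySem.Int.floordiv ((data.length : Int) * f) t := by
      rw [PySem.Int.floordiv_eq_ediv_of_pos htp]
      exact Int.ediv_nonneg (by positivity) (by omega)
    have hkM : (k : Int) < PySem.Int.floordiv ((data.length : Int) * f) t := by omega
    simp only [Function.comp, zero_add]
    have e1 : -((k : Int) + 1) * t = -(((k : Int) + 1) * t) := by ring
    rw [e1]
    exact convB_elt f t ((1 <<< t.toNat) - 1) hf ht data k hkM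
  rw [hBmap]
  simp only [pvPref]
  cases pad with
  | false => simp
  | true =>
    by_cases hz : PySem.Int.mod ((data.length : Int) * f) t = 0
    · simp [hz]
    · simp [hz]
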